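-- pv_equiv track=rewrite | github.com/aditi-malav/Ai-Dungeon-Master-Bootcamp-Project | app.py | trim_bullets
-- ===== SOURCE A (Python) =====
-- def trim_bullets(long_ctx: str, max_chars: int = 1200) -> str:
--     """Trim long-term bullets to keep prompt small (rate-limit friendly)."""
--     if not long_ctx or len(long_ctx) <= max_chars:
--         return long_ctx
--     lines = long_ctx.splitlines()
--     header = lines[0] if lines else ""
--     bullets = [l for l in lines[1:] if l.strip().startswith("-")]
--     kept, size = [], len(header)
--     for b in bullets:
--         if size + len(b) + 1 > max_chars:
--             break
--         kept.append(b)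
--         size += len(b) + 1
--     return "\n".join([header] + kept)
-- ===== SOURCE B (Python) =====
-- def trim_bullets(long_ctx: str, max_chars: int = 1200) -> str:
--     """Trim long-term bullets to keep prompt small (rate-limit friendly)."""
--     if not long_ctx or len(long_ctx) <= max_chars:
--         return long_ctx
--     lines = long_ctx.splitlines()
--     header = lines[0] if lines else ""
--     bullets = [l for l in lines[1:] if l.strip().startswith("-")]
--     # prefix[k] = len(header) + total cost of the first k bullets (cost = len + 1 for '\n')
--     prefix = [len(header)]
--     for b in bullets:
--         prefix.append(prefix[-1] + len(b) + 1)
--     # prefix is strictly increasing, so the greedy cutoff is the largest k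
--     # with prefix[k] <= max_chars (0 if none): find it by binary search.
--     lo, hi = 0, len(bullets)
--     while lo < hi:
--         mid = (lo + hi + 1) // 2
--         if prefix[mid] <= max_chars:
--             lo = mid
--         else:
--             hi = mid - 1
--     return "\n".join([header] + bullets[:lo])
-- ===== Notes on version B (the rewrite author's own statement) =====
-- stated objective: alternative
-- what changed: Replaces the greedy break-loop over bullets by a prefix-sum cost table plus a binary search for the largest prefix that fits the budget, then slices bullets[:cutoff].
import Mathlib
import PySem

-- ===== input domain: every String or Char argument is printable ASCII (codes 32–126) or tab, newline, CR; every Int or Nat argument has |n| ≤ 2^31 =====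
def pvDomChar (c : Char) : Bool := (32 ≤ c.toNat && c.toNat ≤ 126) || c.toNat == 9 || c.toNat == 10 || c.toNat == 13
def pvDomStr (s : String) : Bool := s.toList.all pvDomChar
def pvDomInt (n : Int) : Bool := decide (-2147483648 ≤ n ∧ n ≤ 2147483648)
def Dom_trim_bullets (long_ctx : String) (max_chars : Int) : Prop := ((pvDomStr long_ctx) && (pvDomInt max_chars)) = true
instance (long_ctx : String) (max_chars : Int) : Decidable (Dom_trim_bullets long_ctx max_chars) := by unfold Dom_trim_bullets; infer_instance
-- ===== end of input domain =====

-- B replaces A's greedy break-loop by a prefix-sum cost table plus a binary search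
-- for the cutoff (objective: alternative decomposition, same O(n) cost).

-- ===== PORT A =====
-- A's for-loop with break: structural recursion over the bullets with the running size.
def pvKeptLoop (max_chars : Int) (size : Int) : List String → List String
  | [] => []
  | b :: bs =>
      if size + PySem.Str.len b + 1 > max_chars then []
      else b :: pvKeptLoop max_chars (size + PySem.Str.len b + 1) bs

def trim_bullets (long_ctx : String) (max_chars : Int) : String :=
  if long_ctx = "" ∨ PySem.Str.len long_ctx ≤ max_chars then long_ctx
  else
    let lines := PySem.Str.splitlines long_ctx
    let header := match lines with | [] => "" | h :: _ => h
    let bullets := (PySem.List.slice lines (some 1) none).filter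
        (fun l => PySem.Str.startswith (PySem.Str.strip l) "-")
    PySem.Str.join "\n" (header :: pvKeptLoop max_chars (PySem.Str.len header) bullets)

-- ===== PORT B =====
-- B's 'for b in bullets: prefix.append(prefix[-1] + len(b) + 1)';
-- prefix[-1] via pyGet?; the accumulator is always nonempty, so .getD 0 never fires.
def pvBuildPrefix : List String → List Int → List Int
  | [], p => p
  | b :: bs, p =>
      pvBuildPrefix bs (p ++ [(PySem.List.pyGet? p (-1)).getD 0 + PySem.Str.len b + 1])

-- B's while-loop; lo, hi stay nonnegative in Python, so Nat with Nat division is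
-- exact for '(lo + hi + 1) // 2'; prefix[mid] via pyGet? (mid is always in range,
-- so the .getD 0 totalizer never fires).
def pvBSearch (p : List Int) (max_chars : Int) (lo hi : Nat) : Nat :=
  if _h : lo < hi then
    if (PySem.List.pyGet? p (((lo + hi + 1) / 2 : Nat) : Int)).getD 0 ≤ max_chars then
      pvBSearch p max_chars ((lo + hi + 1) / 2) hi
    else
      pvBSearch p max_chars lo ((lo + hi + 1) / 2 - 1)
  else lo
termination_by hi - lo
decreasing_by all_goals omega

def trim_bullets_alt (long_ctx : String) (max_chars : Int) : String :=
  if long_ctx = "" ∨ PySem.Str.len long_ctx ≤ max_chars then long_ctx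
  else
    let lines := PySem.Str.splitlines long_ctx
    let header := match lines with | [] => "" | h :: _ => h
    let bullets := (PySem.List.slice lines (some 1) none).filter
        (fun l => PySem.Str.startswith (PySem.Str.strip l) "-")
    let pre := pvBuildPrefix bullets [PySem.Str.len header]
    let lo := pvBSearch pre max_chars 0 bullets.length
    PySem.Str.join "\n" (header :: PySem.List.slice bullets none (some (lo : Int)))

-- ===== PRECONDITION & SPEC =====
def Spec_trim_bullets (long_ctx : String) (max_chars : Int) (out : String) : Prop := out = trim_bullets_alt long_ctx max_chars
instance (long_ctx : String) (max_chars : Int) (out : String) : Decidable (Spec_trim_bullets long_ctx max_chars out) := by unfold Spec_trim_bullets; infer_instance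

-- ===== CLAIM (what is proved, stated in full; the proofs are below) =====
def Claim_equal_trim_bullets : Prop := ∀ (long_ctx : String) (max_chars : Int), Dom_trim_bullets long_ctx max_chars → Spec_trim_bullets long_ctx max_chars (trim_bullets long_ctx max_chars)

-- ===== LEMMAS AND PROOFS =====

-- proof-only helpers
def pvCost (b : String) : Int := PySem.Str.len b + 1

-- the tail of the prefix table starting from running total t
def pvPfxList (t : Int) : List String → List Int
  | [] => []
  | b :: bs => (t + pvCost b) :: pvPfxList (t + pvCost b) bs

-- prefix[k] as a closed form
def pvPfxAt (h : Int) (bs : List String) (k : Nat) : Int :=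
  h + ((bs.take k).map pvCost).sum

-- A's greedy count
def pvGrd (max_chars h : Int) : List String → Nat
  | [] => 0
  | b :: bs =>
      if h + PySem.Str.len b + 1 > max_chars then 0
      else pvGrd max_chars (h + PySem.Str.len b + 1) bs + 1

theorem pvCost_pos (b : String) : 0 < pvCost b := by
  simp only [pvCost, PySem.Str.len_eq]
  omega

theorem pvKeptLoop_eq_take (max_chars h : Int) (bs : List String) :
    pvKeptLoop max_chars h bs = bs.take (pvGrd max_chars h bs) := by
  induction bs generalizing h with
  | nil => rfl
  | cons b bs ih =>
      simp only [pvKeptLoop, pvGrd]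
      split_ifs with hc
      · rfl
      · simp [ih]

theorem pvGrd_le_length (max_chars h : Int) (bs : List String) :
    pvGrd max_chars h bs ≤ bs.length := by
  induction bs generalizing h with
  | nil => simp [pvGrd]
  | cons b bs ih =>
      simp only [pvGrd]
      split_ifs with hc
      · simp
      · simpa using Nat.succ_le_succ (ih _)

theorem pvPfxAt_zero (h : Int) (bs : List String) : pvPfxAt h bs 0 = h := by
  simp [pvPfxAt]

theorem pvPfxAt_cons_succ (h : Int) (b : String) (bs : List String) (k : Nat) :
    pvPfxAt h (b :: bs) (k + 1) = pvPfxAt (h + pvCost b) bs k := by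
  simp [pvPfxAt, List.take_succ_cons]
  ring

theorem pvPfxAt_mono (h : Int) (bs : List String) {j k : Nat} (hjk : j ≤ k) :
    pvPfxAt h bs j ≤ pvPfxAt h bs k := by
  induction bs generalizing h j k with
  | nil => simp [pvPfxAt]
  | cons b bs ih =>
      cases j with
      | zero =>
          cases k with
          | zero => exact le_refl _
          | succ k =>
              rw [pvPfxAt_zero, pvPfxAt_cons_succ]
              have h1 : h + pvCost b ≤ pvPfxAt (h + pvCost b) bs k := by
                have := ih (h + pvCost b) (Nat.zero_le k)
                rwa [pvPfxAt_zero] at this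
              have := pvCost_pos b
              omega
      | succ j =>
          cases k with
          | zero => omega
          | succ k =>
              rw [pvPfxAt_cons_succ, pvPfxAt_cons_succ]
              exact ih _ (Nat.le_of_succ_le_succ hjk)

-- characterisation of the greedy count
theorem pvGrd_spec (max_chars h : Int) (bs : List String) :
    (pvPfxAt h bs (pvGrd max_chars h bs) ≤ max_chars ∨ pvGrd max_chars h bs = 0) ∧
    (pvGrd max_chars h bs < bs.length →
      max_chars < pvPfxAt h bs (pvGrd max_chars h bs + 1)) := by
  induction bs generalizing h with
  | nil => exact ⟨Or.inr rfl, by simp [pvGrd]⟩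
  | cons b bs ih =>
      simp only [pvGrd]
      split_ifs with hc
      · refine ⟨Or.inr rfl, fun _ => ?_⟩
        rw [pvPfxAt_cons_succ, pvPfxAt_zero]
        simp only [pvCost]
        omega
      · obtain ⟨ih1, ih2⟩ := ih (h + PySem.Str.len b + 1)
        have hcost : h + pvCost b = h + PySem.Str.len b + 1 := by
          simp only [pvCost]; ring
        constructor
        · left
          rw [pvPfxAt_cons_succ, hcost]
          rcases ih1 with h1 | h1
          · exact h1
          · rw [h1, pvPfxAt_zero]; omega
        · intro hlt
          rw [pvPfxAt_cons_succ, hcost]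
          exact ih2 (by simpa using Nat.lt_of_succ_lt_succ hlt)

-- the built prefix table is h :: pvPfxList h bs
theorem pvBuildPrefix_spec (bs : List String) (p : List Int) (hp : p ≠ []) :
    pvBuildPrefix bs p = p ++ pvPfxList (p.getLast hp) bs := by
  induction bs generalizing p with
  | nil => simp [pvBuildPrefix, pvPfxList]
  | cons b bs ih =>
      simp only [pvBuildPrefix]
      rw [PySem.List.pyGet?_neg_one, List.getLast?_eq_getLast_of_ne_nil hp,
        Option.getD_some]
      rw [ih _ (by simp)]
      rw [List.getLast_append_singleton]
      have harg : p.getLast hp + PySem.Str.len b + 1 = p.getLast hp + pvCost b := by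
        simp only [pvCost]; ring
      rw [harg]
      simp [pvPfxList, List.append_assoc]

-- indexing the prefix table
theorem pvPrefix_getElem (h : Int) (bs : List String) (k : Nat) (hk : k ≤ bs.length) :
    (h :: pvPfxList h bs)[k]? = some (pvPfxAt h bs k) := by
  induction bs generalizing h k with
  | nil =>
      have hk0 : k = 0 := by simpa using hk
      subst hk0
      simp [pvPfxAt_zero]
  | cons b bs ih =>
      cases k with
      | zero => simp [pvPfxAt_zero]
      | succ k =>
          rw [pvPfxAt_cons_succ]
          simpa [pvPfxList] using ih (h + pvCost b) k (by simpa using hk)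

-- binary-search characterisation on the prefix table (d = hi - lo is the fuel)
theorem pvBSearch_specAux (max_chars : Int) (h : Int) (bs : List String) :
    ∀ (d lo hi : Nat), hi - lo = d → lo ≤ hi → hi ≤ bs.length →
    (pvPfxAt h bs lo ≤ max_chars ∨ lo = 0) →
    (∀ k, hi < k → k ≤ bs.length → max_chars < pvPfxAt h bs k) →
    pvBSearch (h :: pvPfxList h bs) max_chars lo hi ≤ bs.length ∧
    (pvPfxAt h bs (pvBSearch (h :: pvPfxList h bs) max_chars lo hi) ≤ max_chars ∨
      pvBSearch (h :: pvPfxList h bs) max_chars lo hi = 0) ∧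
    (∀ k, pvBSearch (h :: pvPfxList h bs) max_chars lo hi < k → k ≤ bs.length →
      max_chars < pvPfxAt h bs k) := by
  intro d
  induction d using Nat.strong_induction_on with
  | _ d ih =>
  intro lo hi hd hlh hhn hgood hbad
  rw [pvBSearch]
  by_cases hlt : lo < hi
  · simp only [hlt, dif_pos]
    have hmid1 : lo < (lo + hi + 1) / 2 := by omega
    have hmid2 : (lo + hi + 1) / 2 ≤ hi := by omega
    have hmn : (lo + hi + 1) / 2 ≤ bs.length := le_trans hmid2 hhn
    rw [PySem.List.pyGet?_natCast, pvPrefix_getElem h bs _ hmn, Option.getD_some]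
    split_ifs with hcond
    · exact ih (hi - (lo + hi + 1) / 2) (by omega) _ hi rfl hmid2 hhn
        (Or.inl hcond) hbad
    · refine ih ((lo + hi + 1) / 2 - 1 - lo) (by omega) lo _ rfl (by omega)
        (by omega) hgood ?_
      intro k hk1 hk2
      rcases Nat.lt_or_ge hi k with hgt | hge
      · exact hbad k hgt hk2
      · exact lt_of_lt_of_le (lt_of_not_ge hcond) (pvPfxAt_mono h bs (by omega))
  · simp only [hlt, dif_neg, not_false_iff]
    exact ⟨by omega, hgood, fun k hk1 hk2 => hbad k (by omega) hk2⟩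

-- uniqueness of the characterisation
theorem pvCut_unique (max_chars : Int) (h : Int) (bs : List String) (r g : Nat)
    (hr : r ≤ bs.length) (hg : g ≤ bs.length)
    (hr1 : pvPfxAt h bs r ≤ max_chars ∨ r = 0)
    (hr2 : ∀ k, r < k → k ≤ bs.length → max_chars < pvPfxAt h bs k)
    (hg1 : pvPfxAt h bs g ≤ max_chars ∨ g = 0)
    (hg2 : ∀ k, g < k → k ≤ bs.length → max_chars < pvPfxAt h bs k) : r = g := by
  rcases lt_trichotomy r g with hlt | heq | hgt
  · have := hr2 g hlt hg
    rcases hg1 with h1 | h1 <;> omega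
  · exact heq
  · have := hg2 r hgt hr
    rcases hr1 with h1 | h1 <;> omega

-- the core: A's loop = take of B's binary-search cutoff
theorem pvCore (max_chars h : Int) (bs : List String) :
    pvKeptLoop max_chars h bs =
      bs.take (pvBSearch (pvBuildPrefix bs [h]) max_chars 0 bs.length) := by
  have hbuild : pvBuildPrefix bs [h] = h :: pvPfxList h bs := by
    simpa using pvBuildPrefix_spec bs [h] (by simp)
  rw [hbuild, pvKeptLoop_eq_take]
  obtain ⟨hr, hr1, hr2⟩ := pvBSearch_specAux max_chars h bs (bs.length - 0) 0
    bs.length rfl (Nat.zero_le _) (le_refl _) (Or.inr rfl)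
    (by intro k hk1 hk2; omega)
  have hg := pvGrd_spec max_chars h bs
  have hgle := pvGrd_le_length max_chars h bs
  have hg2 : ∀ k, pvGrd max_chars h bs < k → k ≤ bs.length →
      max_chars < pvPfxAt h bs k := by
    intro k hk1 hk2
    have hstep := hg.2 (by omega)
    exact lt_of_lt_of_le hstep (pvPfxAt_mono h bs (by omega))
  have := pvCut_unique max_chars h bs _ _ hr hgle hr1 hr2 hg.1 hg2
  rw [this]

-- ===== VERDICT (by name: the statement is the Claim_ definition above) =====
set_option maxHeartbeats 400000 in
theorem trim_bullets_spec : Claim_equal_trim_bullets := by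
  intro long_ctx max_chars _
  unfold Spec_trim_bullets trim_bullets trim_bullets_alt
  split_ifs with hguard
  · rfl
  · simp only
    rw [PySem.List.slice_to_natCast, ← pvCore]
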